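-- pv_equiv track=rewrite | github.com/AnonymousUser0705/ProteinArena | PredictionModule/util_helper.py | classify_pair_types
-- ===== SOURCE A (Python) =====
-- from typing import Dict, List, Optional, Set
--
-- def classify_pair_types(
--     pids_a: List[str], pids_b: List[str], train_proteins: Set[str]
-- ) -> List[str]:
--     """Classify pairs as seen-seen / seen-unseen / unseen-unseen."""
--     pair_types = []
--     for a, b in zip(pids_a, pids_b):
--         a_in = a in train_proteins
--         b_in = b in train_proteins
--         if a_in and b_in:
--             pair_types.append("seen-seen")
--         elif a_in or b_in:
--             pair_types.append("seen-unseen")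
--         else:
--             pair_types.append("unseen-unseen")
--     return pair_types
-- ===== SOURCE B (Python) =====
-- def classify_pair_types(pids_a, pids_b, train_proteins):
--     """Classify pairs as seen-seen / seen-unseen / unseen-unseen."""
--     def tag(p):
--         return "seen" if p in train_proteins else "unseen"
--     tags_a = list(map(tag, pids_a))
--     tags_b = list(map(tag, pids_b))
--     return ["-".join(sorted([ta, tb])) for ta, tb in zip(tags_a, tags_b)]
-- ===== Notes on version B (the rewrite author's own statement) =====
-- stated objective: alternative
-- what changed: Instead of one loop with a branch cascade selecting among three constant strings, B first maps each id list to a 'seen'/'unseen' tag list, then CONSTRUCTS each label by sorting the two tags and joining them with '-' (sorting yields the canonical seen-unseen order), so no branching on combinations exists at all.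
import Mathlib
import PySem

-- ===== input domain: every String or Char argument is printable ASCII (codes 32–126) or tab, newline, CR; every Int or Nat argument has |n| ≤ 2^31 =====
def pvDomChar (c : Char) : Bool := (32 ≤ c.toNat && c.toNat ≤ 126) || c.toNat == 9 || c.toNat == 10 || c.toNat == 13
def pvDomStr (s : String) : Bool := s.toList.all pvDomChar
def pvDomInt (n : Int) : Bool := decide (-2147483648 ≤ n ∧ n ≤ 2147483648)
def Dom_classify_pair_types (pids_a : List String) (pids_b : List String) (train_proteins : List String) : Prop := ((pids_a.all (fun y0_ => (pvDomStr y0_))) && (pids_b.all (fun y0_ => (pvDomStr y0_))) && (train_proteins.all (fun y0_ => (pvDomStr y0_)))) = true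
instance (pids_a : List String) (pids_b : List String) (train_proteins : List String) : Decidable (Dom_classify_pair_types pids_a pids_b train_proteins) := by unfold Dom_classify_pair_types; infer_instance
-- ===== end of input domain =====

-- B stages the work: map each id list to 'seen'/'unseen' tags, then build each
-- label by sorting the two tags and joining with '-', removing the branch cascade
-- (objective: alternative).

-- ===== PORT A =====
def classify_pair_types (pids_a : List String) (pids_b : List String) (train_proteins : List String) : List String :=
  (pids_a.zip pids_b).foldl (fun pair_types p =>
    let a_in := train_proteins.contains p.1
    let b_in := train_proteins.contains p.2
    if a_in && b_in then pair_types ++ ["seen-seen"]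
    else if a_in || b_in then pair_types ++ ["seen-unseen"]
    else pair_types ++ ["unseen-unseen"]) []

-- ===== PORT B =====
def pvTag (train_proteins : List String) (p : String) : String :=
  if train_proteins.contains p then "seen" else "unseen"

def classify_pair_types_alt (pids_a : List String) (pids_b : List String) (train_proteins : List String) : List String :=
  let tags_a := pids_a.map (pvTag train_proteins)
  let tags_b := pids_b.map (pvTag train_proteins)
  (tags_a.zip tags_b).map (fun t => PySem.Str.join "-" (PySem.List.sorted [t.1, t.2] (fun x => x) false))

-- ===== PRECONDITION & SPEC =====
def Spec_classify_pair_types (pids_a : List String) (pids_b : List String) (train_proteins : List String) (out : List String) : Prop := out = classify_pair_types_alt pids_a pids_b train_proteins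
instance (pids_a : List String) (pids_b : List String) (train_proteins : List String) (out : List String) : Decidable (Spec_classify_pair_types pids_a pids_b train_proteins out) := by unfold Spec_classify_pair_types; infer_instance

-- ===== CLAIM =====
def Claim_equal_classify_pair_types : Prop := ∀ (pids_a : List String) (pids_b : List String) (train_proteins : List String), Dom_classify_pair_types pids_a pids_b train_proteins → Spec_classify_pair_types pids_a pids_b train_proteins (classify_pair_types pids_a pids_b train_proteins)

-- ===== LEMMAS AND PROOFS =====
theorem pvLabel_eq (tp : List String) (a b : String) :
    (if tp.contains a && tp.contains b then "seen-seen"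
     else if tp.contains a || tp.contains b then "seen-unseen"
     else "unseen-unseen") =
    PySem.Str.join "-" (PySem.List.sorted [pvTag tp a, pvTag tp b] (fun x => x) false) := by
  cases h1 : tp.contains a <;> cases h2 : tp.contains b <;> simp at h1 h2 <;>
    simp [pvTag, h1, h2, PySem.Str.join, PySem.List.sorted, PySem.List.insertBy,
      PySem.Chars.join] <;> rfl

-- ===== VERDICT =====
theorem classify_pair_types_spec : Claim_equal_classify_pair_types := by
  intro pids_a pids_b tp _
  unfold Spec_classify_pair_types classify_pair_types classify_pair_types_alt
  simp only []
  rw [List.zip_map, List.map_map]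
  have key : ∀ (l : List (String × String)) (acc : List String),
      l.foldl (fun pair_types p =>
        let a_in := tp.contains p.1
        let b_in := tp.contains p.2
        if a_in && b_in then pair_types ++ ["seen-seen"]
        else if a_in || b_in then pair_types ++ ["seen-unseen"]
        else pair_types ++ ["unseen-unseen"]) acc =
      acc ++ l.map (fun p =>
        PySem.Str.join "-" (PySem.List.sorted [pvTag tp p.1, pvTag tp p.2] (fun x => x) false)) := by
    intro l
    induction l with
    | nil => intro acc; simp
    | cons x xs ih =>
      intro acc
      simp only [List.foldl, List.map]
      rw [ih, ← pvLabel_eq]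
      cases h1 : tp.contains x.1 <;> cases h2 : tp.contains x.2 <;> simp
  simpa using key (pids_a.zip pids_b) []
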